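-- pv_equiv track=rewrite | github.com/DNYoussef/codeguard-action | src/risk_classifier.py | _score_zones
-- ===== SOURCE A (Python) =====
-- def _score_zones(zones: list) -> int:
--     """Score based on sensitive zones detected."""
--     if not zones:
--         return 0
--
--     zone_types = set(z.get("zone") for z in zones)
--
--     # Critical zones
--     if zone_types & {"payment", "crypto", "pii"}:
--         return 4
--
--     # High zones
--     if zone_types & {"auth", "security", "database"}:
--         return 3
--
--     # Medium zones
--     if zone_types & {"config", "infra"}:
--         return 2
--
--     return 1
-- ===== SOURCE B (Python) =====
-- _SCORES = {
--     "payment": 4, "crypto": 4, "pii": 4,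
--     "auth": 3, "security": 3, "database": 3,
--     "config": 2, "infra": 2,
-- }
--
-- def _score_zones(zones: list) -> int:
--     """Score based on sensitive zones detected."""
--     if not zones:
--         return 0
--     return max(_SCORES.get(z.get("zone"), 1) for z in zones)
-- ===== Notes on version B (the rewrite author's own statement) =====
-- stated objective: simpler
-- what changed: Replaced the set construction plus three sequential set-intersection branches by a single-pass max reduction over a zone→score lookup table with default 1.
import Mathlib
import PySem

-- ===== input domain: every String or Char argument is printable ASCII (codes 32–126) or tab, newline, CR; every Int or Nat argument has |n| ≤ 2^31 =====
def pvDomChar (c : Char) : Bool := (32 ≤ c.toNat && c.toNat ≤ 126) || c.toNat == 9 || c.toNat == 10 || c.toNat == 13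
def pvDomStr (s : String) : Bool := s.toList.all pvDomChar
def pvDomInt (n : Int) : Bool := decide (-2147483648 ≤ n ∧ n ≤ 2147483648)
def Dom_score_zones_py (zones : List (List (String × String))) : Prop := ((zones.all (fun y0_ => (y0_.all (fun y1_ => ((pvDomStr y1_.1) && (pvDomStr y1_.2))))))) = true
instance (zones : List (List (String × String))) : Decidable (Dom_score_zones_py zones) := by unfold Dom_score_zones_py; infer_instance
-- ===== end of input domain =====

-- B replaces the set build + three sequential set-intersection branches by one max reduction
-- over a zone→score lookup table (objective: simpler).

-- ===== PORT A =====
def score_zones_py (zones : List (List (String × String))) : Int :=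
  if zones = [] then 0
  else
    let zone_types : PySem.Set (Option String) :=
      PySem.Set.ofList (zones.map fun z => (PySem.Dict.mk z).get? "zone")
    if PySem.Set.inter zone_types
        (PySem.Set.ofList [some "payment", some "crypto", some "pii"]) ≠ [] then 4
    else if PySem.Set.inter zone_types
        (PySem.Set.ofList [some "auth", some "security", some "database"]) ≠ [] then 3
    else if PySem.Set.inter zone_types
        (PySem.Set.ofList [some "config", some "infra"]) ≠ [] then 2
    else 1

-- ===== PORT B =====
def pvScoresDict : PySem.Dict String Int :=
  PySem.Dict.mk [("payment", 4), ("crypto", 4), ("pii", 4),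
   ("auth", 3), ("security", 3), ("database", 3),
   ("config", 2), ("infra", 2)]

-- _SCORES.get(z.get("zone"), 1); a None key is never in the dict, so it yields the default 1
def pvScore (v : Option String) : Int :=
  match v with
  | none => 1
  | some s => PySem.Dict.getD pvScoresDict s 1

def score_zones_py_alt (zones : List (List (String × String))) : Int :=
  if zones = [] then 0
  else (PySem.List.max? (zones.map fun z => pvScore ((PySem.Dict.mk z).get? "zone"))
          (fun x => x)).getD 0

-- ===== PRECONDITION & SPEC =====
def Spec_score_zones_py (zones : List (List (String × String))) (out : Int) : Prop := out = score_zones_py_alt zones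
instance (zones : List (List (String × String))) (out : Int) : Decidable (Spec_score_zones_py zones out) := by unfold Spec_score_zones_py; infer_instance

-- ===== CLAIM (what is proved, stated in full; the proofs are below) =====
def Claim_equal_score_zones_py : Prop := ∀ (zones : List (List (String × String))), Dom_score_zones_py zones → Spec_score_zones_py zones (score_zones_py zones)

-- ===== LEMMAS AND PROOFS =====

lemma pvScore_default (s : String) (h1 : ¬s = "payment") (h2 : ¬s = "crypto")
    (h3 : ¬s = "pii") (h4 : ¬s = "auth") (h5 : ¬s = "security") (h6 : ¬s = "database")
    (h7 : ¬s = "config") (h8 : ¬s = "infra") : PySem.Dict.getD pvScoresDict s 1 = 1 := by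
  have e1 : ("payment" == s) = false := by simp only [beq_eq_false_iff_ne]; exact fun h => h1 h.symm
  have e2 : ("crypto" == s) = false := by simp only [beq_eq_false_iff_ne]; exact fun h => h2 h.symm
  have e3 : ("pii" == s) = false := by simp only [beq_eq_false_iff_ne]; exact fun h => h3 h.symm
  have e4 : ("auth" == s) = false := by simp only [beq_eq_false_iff_ne]; exact fun h => h4 h.symm
  have e5 : ("security" == s) = false := by simp only [beq_eq_false_iff_ne]; exact fun h => h5 h.symm
  have e6 : ("database" == s) = false := by simp only [beq_eq_false_iff_ne]; exact fun h => h6 h.symm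
  have e7 : ("config" == s) = false := by simp only [beq_eq_false_iff_ne]; exact fun h => h7 h.symm
  have e8 : ("infra" == s) = false := by simp only [beq_eq_false_iff_ne]; exact fun h => h8 h.symm
  simp [pvScoresDict, PySem.Dict.getD, PySem.Dict.get?, List.find?, e1, e2, e3, e4, e5, e6, e7, e8]

lemma pvScore_cases (v : Option String) :
    pvScore v =
      if v = some "payment" ∨ v = some "crypto" ∨ v = some "pii" then 4
      else if v = some "auth" ∨ v = some "security" ∨ v = some "database" then 3
      else if v = some "config" ∨ v = some "infra" then 2
      else 1 := by
  match v with
  | none => simp [pvScore]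
  | some s =>
    simp only [pvScore, Option.some.injEq]
    by_cases h1 : s = "payment" <;> by_cases h2 : s = "crypto" <;> by_cases h3 : s = "pii" <;>
    by_cases h4 : s = "auth" <;> by_cases h5 : s = "security" <;> by_cases h6 : s = "database" <;>
    by_cases h7 : s = "config" <;> by_cases h8 : s = "infra" <;>
    first
      | (simp_all [pvScoresDict, PySem.Dict.getD, PySem.Dict.get?, List.find?]; done)
      | (rw [if_neg (by tauto), if_neg (by tauto), if_neg (by tauto)]; exact pvScore_default s h1 h2 h3 h4 h5 h6 h7 h8)

lemma pvScore_le_four (v : Option String) : pvScore v ≤ 4 := by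
  rw [pvScore_cases]; split_ifs <;> norm_num

lemma pvScore_eq_four (v : Option String)
    (h : v = some "payment" ∨ v = some "crypto" ∨ v = some "pii") : pvScore v = 4 := by
  rw [pvScore_cases]; rcases h with rfl | rfl | rfl <;> simp

lemma pvScore_eq_three (v : Option String)
    (h : v = some "auth" ∨ v = some "security" ∨ v = some "database") : pvScore v = 3 := by
  rw [pvScore_cases]; rcases h with rfl | rfl | rfl <;> simp

lemma pvScore_eq_two (v : Option String)
    (h : v = some "config" ∨ v = some "infra") : pvScore v = 2 := by
  rw [pvScore_cases]; rcases h with rfl | rfl <;> simp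

lemma pvScore_le_three (v : Option String)
    (h : ¬(v = some "payment" ∨ v = some "crypto" ∨ v = some "pii")) : pvScore v ≤ 3 := by
  rw [pvScore_cases]
  split_ifs with c1 c2 c3 <;> first | norm_num | exact absurd c1 h

lemma pvScore_le_two (v : Option String)
    (h : ¬(v = some "payment" ∨ v = some "crypto" ∨ v = some "pii"))
    (h' : ¬(v = some "auth" ∨ v = some "security" ∨ v = some "database")) : pvScore v ≤ 2 := by
  rw [pvScore_cases]
  split_ifs with c1 c2 c3 <;> first | norm_num | exact absurd c1 h | exact absurd c2 h'

lemma pvScore_eq_one (v : Option String)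
    (h : ¬(v = some "payment" ∨ v = some "crypto" ∨ v = some "pii"))
    (h' : ¬(v = some "auth" ∨ v = some "security" ∨ v = some "database"))
    (h'' : ¬(v = some "config" ∨ v = some "infra")) : pvScore v = 1 := by
  rw [pvScore_cases]
  split_ifs with c1 c2 c3 <;>
    first | rfl | exact absurd c1 h | exact absurd c2 h' | exact absurd c3 h''

-- B's max over a nonempty list: membership + upper bound
lemma pvMax_char (a : Int) (t : List Int) :
    ((PySem.List.max? (a :: t) (fun x => x)).getD 0 ∈ a :: t) ∧
    (∀ y ∈ a :: t, y ≤ (PySem.List.max? (a :: t) (fun x => x)).getD 0) := by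
  rw [PySem.List.max?_id_cons]
  simp only [Option.getD_some]
  constructor
  · rcases PySem.List.foldl_max_mem t a with h | h
    · rw [h]; exact List.mem_cons_self
    · exact List.mem_cons_of_mem _ h
  · intro y hy
    rcases List.mem_cons.mp hy with rfl | hy
    · exact (PySem.List.le_foldl_max t y).1
    · exact (PySem.List.le_foldl_max t a).2 y hy

-- A's branch test via membership
lemma pvInter_ne (s : PySem.Set (Option String)) (t : List (Option String)) :
    PySem.Set.inter s t ≠ [] ↔ ∃ v ∈ s, v ∈ t := by
  constructor
  · intro h
    rcases List.exists_mem_of_ne_nil _ h with ⟨v, hv⟩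
    exact ⟨v, (PySem.Set.mem_inter _ _ _).mp hv⟩
  · rintro ⟨v, hs, ht⟩ h
    have := (PySem.Set.mem_inter s t v).mpr ⟨hs, ht⟩
    rw [h] at this
    exact List.not_mem_nil this

lemma pvMem3 (v a b c : Option String) :
    v ∈ PySem.Set.ofList [a, b, c] ↔ v = a ∨ v = b ∨ v = c := by
  rw [PySem.Set.mem_ofList]; simp

lemma pvMem2 (v a b : Option String) :
    v ∈ PySem.Set.ofList [a, b] ↔ v = a ∨ v = b := by
  rw [PySem.Set.mem_ofList]; simp

-- ===== VERDICT (by name: the statement is the Claim_ definition above) =====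
theorem score_zones_py_spec : Claim_equal_score_zones_py := by
  intro zones _
  show score_zones_py zones = score_zones_py_alt zones
  match zones with
  | [] => rfl
  | z :: zs =>
    unfold score_zones_py score_zones_py_alt
    simp only [reduceCtorEq, if_false, List.map_cons]
    set L := (z :: zs).map fun z => (PySem.Dict.mk z).get? "zone" with hL
    obtain ⟨hmem, hub⟩ := pvMax_char (pvScore ((PySem.Dict.mk z).get? "zone"))
      (zs.map fun z => pvScore ((PySem.Dict.mk z).get? "zone"))
    have hEq : (pvScore ((PySem.Dict.mk z).get? "zone") ::
        zs.map fun z => pvScore ((PySem.Dict.mk z).get? "zone")) = L.map pvScore := by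
      simp [hL, Function.comp]
    rw [hEq] at hmem hub
    rw [show (pvScore ((PySem.Dict.mk z).get? "zone") ::
        List.map (fun z => pvScore ((PySem.Dict.mk z).get? "zone")) zs) = L.map pvScore from hEq]
    set M := (PySem.List.max? (L.map pvScore) (fun x => x)).getD 0 with hM
    have hOf : ∀ v, v ∈ PySem.Set.ofList L ↔ v ∈ L := fun v => PySem.Set.mem_ofList L v
    have key : ∀ v ∈ L, pvScore v ≤ M := fun v hv => hub _ (List.mem_map_of_mem hv)
    obtain ⟨w, hwL, hwM⟩ := List.mem_map.mp hmem
    split_ifs with h1 h2 h3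
    · -- critical branch: some v scores 4, and every score is ≤ 4
      rw [pvInter_ne] at h1
      obtain ⟨v, hvs, hvt⟩ := h1
      rw [pvMem3] at hvt
      have hge := key v ((hOf v).mp hvs)
      rw [pvScore_eq_four v hvt] at hge
      have hle : M ≤ 4 := hwM ▸ pvScore_le_four w
      omega
    · -- high branch: nothing critical, some v scores 3, every score is ≤ 3
      rw [pvInter_ne] at h1 h2
      push_neg at h1
      obtain ⟨v, hvs, hvt⟩ := h2
      rw [pvMem3] at hvt
      have hge := key v ((hOf v).mp hvs)
      rw [pvScore_eq_three v hvt] at hge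
      have hnw := h1 w ((hOf w).mpr hwL)
      rw [pvMem3] at hnw
      have hle : M ≤ 3 := hwM ▸ pvScore_le_three w hnw
      omega
    · -- medium branch: nothing critical or high, some v scores 2, every score is ≤ 2
      rw [pvInter_ne] at h1 h2 h3
      push_neg at h1 h2
      obtain ⟨v, hvs, hvt⟩ := h3
      rw [pvMem2] at hvt
      have hge := key v ((hOf v).mp hvs)
      rw [pvScore_eq_two v hvt] at hge
      have hn1 := h1 w ((hOf w).mpr hwL)
      have hn2 := h2 w ((hOf w).mpr hwL)
      rw [pvMem3] at hn1 hn2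
      have hle : M ≤ 2 := hwM ▸ pvScore_le_two w hn1 hn2
      omega
    · -- default branch: every score is 1, in particular the max
      rw [pvInter_ne] at h1 h2 h3
      push_neg at h1 h2 h3
      have hn1 := h1 w ((hOf w).mpr hwL)
      have hn2 := h2 w ((hOf w).mpr hwL)
      have hn3 := h3 w ((hOf w).mpr hwL)
      rw [pvMem3] at hn1 hn2
      rw [pvMem2] at hn3
      rw [← hwM, pvScore_eq_one w hn1 hn2 hn3]
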